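-- pv_equiv track=rewrite | github.com/limdiana/algorithms | homework2/5.py | getDescentPeriods
-- ===== SOURCE A (Python) =====
-- from typing import List
--
-- def getDescentPeriods(prices: List[int]) -> int:
--
--     pr = len(prices)
--     d = [1] * pr
--     f = 1
--     for i in range(1, pr):
--         if prices[i - 1] - prices[i] == 1:
--             d[i] = d[i - 1] + 1
--         f += d[i]
--     return f
-- ===== SOURCE B (Python) =====
-- def getDescentPeriods(prices):
--     # Single pass over run lengths: each maximal descent run of length r
--     # contributes r*(r+1)//2 subarrays (closed form), no per-element DP array.
--     total = 0
--     run = 0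
--     prev = None
--     for p in prices:
--         if prev is not None and prev - p == 1:
--             run += 1
--         else:
--             total += run * (run + 1) // 2
--             run = 1
--         prev = p
--     total += run * (run + 1) // 2
--     return total
-- ===== Notes on version B (the rewrite author's own statement) =====
-- stated objective: alternative
-- what changed: Replaces the per-element DP array d[] and its running sum with a single pass that tracks the current descent-run length and adds the closed-form triangular number run*(run+1)//2 per maximal run, using O(1) extra space.
-- intended difference: On the empty list A returns 1 (an artefact of initialising f = 1 before the loop) while B returns 0, the correct count of descent subarrays of an empty array. — e.g. on getDescentPeriods([]): A returns 1, B returns 0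
import Mathlib
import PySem

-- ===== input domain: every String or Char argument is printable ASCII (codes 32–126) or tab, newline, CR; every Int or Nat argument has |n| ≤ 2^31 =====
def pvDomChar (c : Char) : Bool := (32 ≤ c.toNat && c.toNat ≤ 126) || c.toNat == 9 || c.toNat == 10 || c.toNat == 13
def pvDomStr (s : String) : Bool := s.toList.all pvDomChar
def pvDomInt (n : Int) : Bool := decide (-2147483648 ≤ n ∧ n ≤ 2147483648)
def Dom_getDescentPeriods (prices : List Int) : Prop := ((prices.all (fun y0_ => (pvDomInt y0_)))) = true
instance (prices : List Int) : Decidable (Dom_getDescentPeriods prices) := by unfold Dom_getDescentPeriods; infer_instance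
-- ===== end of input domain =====

-- B replaces A's per-element DP array and running sum by a single O(1)-space pass that adds
-- the closed-form triangular number run*(run+1)//2 per maximal descent run; on the empty list
-- B returns 0 where A returns its initialisation artefact 1 (stated as D_ below).

-- ===== PORT A =====
def astep (prices : List Int) (s : List Int × Int) (i : Int) : List Int × Int :=
  let d := if PySem.List.pyGetD prices (i - 1) 0 - PySem.List.pyGetD prices i 0 = 1
           then PySem.List.pySetD s.1 i (PySem.List.pyGetD s.1 (i - 1) 0 + 1)
           else s.1
  (d, s.2 + PySem.List.pyGetD d i 0)

def getDescentPeriods (prices : List Int) : Int :=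
  ((PySem.List.pyRange 1 (prices.length : Int) 1).foldl (astep prices)
    (List.replicate prices.length 1, 1)).2

-- ===== PORT B =====
-- triangular number run*(run+1)//2 (Python's //)
def tri (r : Int) : Int := PySem.Int.floordiv (r * (r + 1)) 2

def bstep (s : Int × Int × Option Int) (p : Int) : Int × Int × Option Int :=
  match s.2.2 with
  | some q => if q - p = 1 then (s.1, s.2.1 + 1, some p) else (s.1 + tri s.2.1, 1, some p)
  | none => (s.1 + tri s.2.1, 1, some p)

def getDescentPeriods_alt (prices : List Int) : Int :=
  let st := prices.foldl bstep (0, 0, none)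
  st.1 + tri st.2.1

-- ===== PRECONDITION & SPEC =====
-- On the empty list A returns 1 (an artefact of initialising f = 1 before the loop) while B
-- returns 0, the correct count of descent subarrays of an empty array.
def D_getDescentPeriods (prices : List Int) : Prop := prices = []
instance (prices : List Int) : Decidable (D_getDescentPeriods prices) := by
  unfold D_getDescentPeriods; infer_instance

def Spec_getDescentPeriods (prices : List Int) (out : Int) : Prop :=
  ¬ D_getDescentPeriods prices → out = getDescentPeriods_alt prices
instance (prices : List Int) (out : Int) : Decidable (Spec_getDescentPeriods prices out) := by
  unfold Spec_getDescentPeriods; infer_instance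

def pvDiffWitness_getDescentPeriods : List Int := []
def pvDiffWitnessOut_getDescentPeriods : Int × Int := (1, 0)

-- ===== CLAIM (what is proved, stated in full; the proofs are below) =====
def Claim_unchanged_getDescentPeriods : Prop := ∀ (prices : List Int), Dom_getDescentPeriods prices → Spec_getDescentPeriods prices (getDescentPeriods prices)
def Claim_changed_getDescentPeriods : Prop := Dom_getDescentPeriods (pvDiffWitness_getDescentPeriods) ∧ D_getDescentPeriods (pvDiffWitness_getDescentPeriods) ∧ getDescentPeriods (pvDiffWitness_getDescentPeriods) = pvDiffWitnessOut_getDescentPeriods.1 ∧ getDescentPeriods_alt (pvDiffWitness_getDescentPeriods) = pvDiffWitnessOut_getDescentPeriods.2 ∧ pvDiffWitnessOut_getDescentPeriods.1 ≠ pvDiffWitnessOut_getDescentPeriods.2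
def Claim_exact_getDescentPeriods : Prop := ∀ (prices : List Int), Dom_getDescentPeriods prices → D_getDescentPeriods prices → getDescentPeriods prices ≠ getDescentPeriods_alt prices

-- ===== LEMMAS AND PROOFS =====

-- run length of the descent run ending at index i (A's d[i])
def dval (prices : List Int) : Nat → Int
  | 0 => 1
  | i + 1 => if prices.getD i 0 - prices.getD (i + 1) 0 = 1 then dval prices i + 1 else 1

def Dlist (prices : List Int) (k : Nat) : List Int :=
  (List.range prices.length).map (fun j => if j < k then dval prices j else 1)

lemma dval_pos (prices : List Int) (k : Nat) : 1 ≤ dval prices k := by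
  cases k with
  | zero => simp [dval]
  | succ m =>
    simp only [dval]
    split
    · have := dval_pos prices m; omega
    · omega

lemma tri_succ (r : Int) (_h : 0 ≤ r) : tri (r + 1) = tri r + (r + 1) := by
  obtain ⟨k, hk⟩ := Int.even_mul_succ_self r
  unfold tri
  rw [PySem.Int.floordiv_eq_ediv_of_pos (by omega), PySem.Int.floordiv_eq_ediv_of_pos (by omega)]
  have h1 : r * (r + 1) = 2 * k := by omega
  have h2 : (r + 1) * (r + 1 + 1) = 2 * (k + r + 1) := by nlinarith
  rw [h1, h2, Int.mul_ediv_cancel_left _ (by omega), Int.mul_ediv_cancel_left _ (by omega)]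
  ring

lemma Dlist_zero (prices : List Int) : Dlist prices 0 = List.replicate prices.length 1 := by
  simp [Dlist]

lemma Dlist_getD (prices : List Int) (k j : Nat) (hj : j < prices.length) :
    (Dlist prices k).getD j 0 = if j < k then dval prices j else 1 := by
  unfold Dlist
  rw [List.getD_eq_getElem _ _ (by simpa using hj)]
  simp

lemma A_loop (prices : List Int) (k : Nat) (hk : k ≤ prices.length) :
    (PySem.List.pyRange 1 (k : Int) 1).foldl (astep prices) (List.replicate prices.length 1, 1)
      = (Dlist prices k, 1 + ∑ i ∈ Finset.Ico 1 k, dval prices i) := by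
  induction k with
  | zero =>
    rw [PySem.List.pyRange_one_eq_nil (by omega)]
    simp [Dlist_zero]
  | succ k ih =>
    rcases Nat.eq_zero_or_pos k with h0 | h1
    · subst h0
      rw [show ((1 : Nat) : Int) = 1 by norm_num, PySem.List.pyRange_one_eq_nil (by omega)]
      simp only [List.foldl_nil]
      refine Prod.ext ?_ (by simp)
      · show List.replicate prices.length 1 = Dlist prices 1
        rw [← Dlist_zero]
        unfold Dlist
        apply List.map_congr_left
        intro j hj
        simp only [List.mem_range] at hj
        rcases Nat.eq_zero_or_pos j with rfl | hp
        · simp [dval]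
        · simp; omega
    · have hkn : k < prices.length := by omega
      have hcast : ((k + 1 : Nat) : Int) = (k : Int) + 1 := by push_cast; ring
      rw [hcast, PySem.List.pyRange_one_succ_right (by exact_mod_cast h1), List.foldl_append,
        ih (by omega)]
      simp only [List.foldl_cons, List.foldl_nil]
      unfold astep
      have hho : ((k : Int) - 1) = ((k - 1 : Nat) : Int) := by omega
      have hget : ∀ (xs : List Int) (j : Nat), PySem.List.pyGetD xs (j : Int) 0 = xs.getD j 0 := by
        intro xs j; simp
      have hc : (PySem.List.pyGetD prices ((k : Int) - 1) 0 - PySem.List.pyGetD prices (k : Int) 0 = 1)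
          ↔ (prices.getD (k - 1) 0 - prices.getD k 0 = 1) := by
        rw [hho, hget, hget]
      have hdvk : dval prices k = if prices.getD (k - 1) 0 - prices.getD k 0 = 1
          then dval prices (k - 1) + 1 else 1 := by
        obtain ⟨m, rfl⟩ : ∃ m, k = m + 1 := ⟨k - 1, by omega⟩
        simp [dval]
      have hDk1 : ∀ h : prices.getD (k - 1) 0 - prices.getD k 0 = 1,
          PySem.List.pySetD (Dlist prices k) (k : Int)
            (PySem.List.pyGetD (Dlist prices k) ((k : Int) - 1) 0 + 1) = Dlist prices (k + 1) := by
        intro h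
        rw [hho, hget, Dlist_getD prices k (k - 1) (by omega), if_pos (by omega)]
        rw [PySem.List.pySetD_natCast]
        apply List.ext_getElem
        · simp [Dlist]
        · intro j hj1 hj2
          simp only [Dlist, List.length_map, List.length_range] at hj2
          rw [List.getElem_set]
          simp only [Dlist, List.getElem_map, List.getElem_range]
          split
          · rename_i hjk; subst hjk
            rw [if_pos (by omega), hdvk, if_pos h]
          · split <;> split <;> first | rfl | omega
      have hDkSame : ∀ _ : ¬ (prices.getD (k - 1) 0 - prices.getD k 0 = 1),
          Dlist prices k = Dlist prices (k + 1) := by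
        intro h
        unfold Dlist
        apply List.map_congr_left
        intro j hj
        split <;> split <;> try rfl
        · omega
        · rename_i hj1 hj2
          have : j = k := by omega
          subst this
          rw [hdvk, if_neg h]
      have hfin : ∑ i ∈ Finset.Ico 1 (k + 1), dval prices i
          = (∑ i ∈ Finset.Ico 1 k, dval prices i) + dval prices k :=
        Finset.sum_Ico_succ_top (by omega) _
      by_cases h : prices.getD (k - 1) 0 - prices.getD k 0 = 1
      · rw [if_pos (hc.mpr h), hDk1 h]
        refine Prod.ext rfl ?_
        show (1 + ∑ i ∈ Finset.Ico 1 k, dval prices i)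
            + PySem.List.pyGetD (Dlist prices (k + 1)) (k : Int) 0 = _
        rw [hget, Dlist_getD prices (k + 1) k hkn, if_pos (by omega), hfin]
        ring
      · rw [if_neg (fun hh => h (hc.mp hh)), hDkSame h]
        refine Prod.ext rfl ?_
        show (1 + ∑ i ∈ Finset.Ico 1 k, dval prices i)
            + PySem.List.pyGetD (Dlist prices (k + 1)) (k : Int) 0 = _
        rw [hget, Dlist_getD prices (k + 1) k hkn, if_pos (by omega), hfin]
        ring

lemma A_eq_sum (prices : List Int) (h : prices ≠ []) :
    getDescentPeriods prices = ∑ i ∈ Finset.range prices.length, dval prices i := by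
  unfold getDescentPeriods
  rw [A_loop prices prices.length le_rfl]
  have hn : 0 < prices.length := List.length_pos_iff.mpr h
  rw [Finset.range_eq_Ico, Finset.sum_eq_sum_Ico_succ_bot hn]
  simp [dval]

lemma B_loop (prices : List Int) (k : Nat) (h1 : 1 ≤ k) (hk : k ≤ prices.length) :
    (prices.take k).foldl bstep (0, 0, none)
      = ((∑ i ∈ Finset.range k, dval prices i) - tri (dval prices (k - 1)),
          dval prices (k - 1), some (prices.getD (k - 1) 0)) := by
  induction k with
  | zero => omega
  | succ k ih =>
    rcases Nat.eq_zero_or_pos k with h0 | hp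
    · subst h0
      obtain ⟨x, xs, rfl⟩ := List.exists_cons_of_ne_nil
        (show prices ≠ [] by intro hnil; subst hnil; simp at hk)
      simp [bstep, dval]
      norm_num [tri, PySem.Int.floordiv]
    · have hkn : k < prices.length := by omega
      have htake : prices.take (k + 1) = prices.take k ++ [prices.getD k 0] := by
        rw [List.take_add_one]
        congr 1
        rw [List.getElem?_eq_getElem hkn]
        simp [List.getD, List.getElem?_eq_getElem hkn]
      rw [htake, List.foldl_append, ih hp (by omega)]
      simp only [List.foldl_cons, List.foldl_nil]
      have hdvk : dval prices k = if prices.getD (k - 1) 0 - prices.getD k 0 = 1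
          then dval prices (k - 1) + 1 else 1 := by
        obtain ⟨m, rfl⟩ : ∃ m, k = m + 1 := ⟨k - 1, by omega⟩
        simp [dval]
      have hfin : ∑ i ∈ Finset.range (k + 1), dval prices i
          = (∑ i ∈ Finset.range k, dval prices i) + dval prices k := Finset.sum_range_succ _ _
      have hpos := dval_pos prices (k - 1)
      unfold bstep
      simp only [Nat.add_sub_cancel]
      by_cases h : prices.getD (k - 1) 0 - prices.getD k 0 = 1
      · rw [if_pos h]
        have hdk : dval prices k = dval prices (k - 1) + 1 := by rw [hdvk, if_pos h]
        rw [hdk, tri_succ _ (by omega), hfin, hdk]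
        refine Prod.ext (by ring) rfl
      · rw [if_neg h]
        have hdk : dval prices k = 1 := by rw [hdvk, if_neg h]
        rw [hfin, hdk]
        have : tri 1 = 1 := by decide
        refine Prod.ext (by rw [this]; ring) (by rw [this])

lemma B_eq_sum (prices : List Int) (h : prices ≠ []) :
    getDescentPeriods_alt prices = ∑ i ∈ Finset.range prices.length, dval prices i := by
  unfold getDescentPeriods_alt
  have hn : 1 ≤ prices.length := List.length_pos_iff.mpr h
  have := B_loop prices prices.length hn le_rfl
  rw [List.take_length] at this
  rw [this]
  ring

-- ===== VERDICT (by name: the statement is the Claim_ definition above) =====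
theorem getDescentPeriods_spec : Claim_unchanged_getDescentPeriods := by
  intro prices _ hD
  rw [A_eq_sum prices hD, B_eq_sum prices hD]

theorem getDescentPeriods_changed : Claim_changed_getDescentPeriods := by
  unfold Claim_changed_getDescentPeriods; decide

theorem getDescentPeriods_tight : Claim_exact_getDescentPeriods := by
  intro prices _ hD
  subst hD
  decide
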